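-- pv_equiv track=rewrite | github.com/IgorJordanJJJ/Python_seminar_Testirovshik | Урок_1._Ввод-Вывод,_операторы_ветвления/Task_6.py | Sum_number
-- ===== SOURCE A (Python) =====
-- def Sum_number(num):
--     sum =0
--     sum2=0
--     while num >0:
--         if num >1000:
--             sum = sum + num%10
--             num= num//10
--         else:
--             sum2 = sum2 + num%10
--             num= num//10
--     return sum, sum2
-- ===== SOURCE B (Python) =====
-- def Sum_number(num):
--     # B: peel num down to the first remainder <= 1000; digits removed during
--     # peeling sum to `sum`, the digits of the peeled tail sum to `sum2`.
--     def dsum(n):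
--         s = 0
--         while n > 0:
--             s += n % 10
--             n //= 10
--         return s
--     m = num
--     while m > 1000:
--         m //= 10
--     return dsum(num) - dsum(m), dsum(m)
-- ===== Notes on version B (the rewrite author's own statement) =====
-- stated objective: alternative
-- what changed: Replaces A's single while-loop that branches per digit on 'num > 1000' with a decomposition: peel num down to the first remainder <= 1000, then compute plain digit sums, returning (dsum(num) - dsum(peeled), dsum(peeled)).
import Mathlib
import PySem

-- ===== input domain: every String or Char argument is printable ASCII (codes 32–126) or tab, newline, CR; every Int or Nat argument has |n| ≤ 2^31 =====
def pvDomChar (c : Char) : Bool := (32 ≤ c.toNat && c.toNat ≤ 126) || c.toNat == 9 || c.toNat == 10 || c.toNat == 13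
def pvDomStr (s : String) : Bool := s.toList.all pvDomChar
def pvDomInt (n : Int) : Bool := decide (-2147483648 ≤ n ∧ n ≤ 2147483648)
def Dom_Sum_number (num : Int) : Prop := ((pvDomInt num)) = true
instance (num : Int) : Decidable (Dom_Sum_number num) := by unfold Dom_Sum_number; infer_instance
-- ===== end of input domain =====

-- B replaces A's single branching loop by a decomposition: peel num down to the first remainder
-- <= 1000, then two plain digit-sum passes give (dsum(num) - dsum(peeled), dsum(peeled)).
-- Both while loops are ported with a fuel parameter (bitLength, always enough digits) that only
-- makes the same computation structurally terminating.

-- ===== PORT A =====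
-- A's while loop with state (sum, sum2), routing each last digit by 'num > 1000'.
def Sum_number_loop : Nat → Int → Int → Int → Int × Int
  | 0, _, s, s2 => (s, s2)
  | fuel+1, num, s, s2 =>
    if num > 0 then
      if num > 1000 then
        Sum_number_loop fuel (PySem.Int.floordiv num 10) (s + PySem.Int.mod num 10) s2
      else
        Sum_number_loop fuel (PySem.Int.floordiv num 10) s (s2 + PySem.Int.mod num 10)
    else (s, s2)

def Sum_number (num : Int) : Int × Int :=
  Sum_number_loop (PySem.Int.bitLength num) num 0 0

-- ===== PORT B =====
-- dsum's while loop, accumulator s.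
def pvDsum : Nat → Int → Int → Int
  | 0, _, s => s
  | fuel+1, n, s =>
    if n > 0 then pvDsum fuel (PySem.Int.floordiv n 10) (s + PySem.Int.mod n 10) else s

-- the 'while m > 1000: m //= 10' peeling loop.
def pvPeel : Nat → Int → Int
  | 0, m => m
  | fuel+1, m => if m > 1000 then pvPeel fuel (PySem.Int.floordiv m 10) else m

def Sum_number_alt (num : Int) : Int × Int :=
  (pvDsum (PySem.Int.bitLength num) num 0 -
     pvDsum (PySem.Int.bitLength (pvPeel (PySem.Int.bitLength num) num))
       (pvPeel (PySem.Int.bitLength num) num) 0,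
   pvDsum (PySem.Int.bitLength (pvPeel (PySem.Int.bitLength num) num))
     (pvPeel (PySem.Int.bitLength num) num) 0)

-- ===== PRECONDITION & SPEC =====
def Spec_Sum_number (num : Int) (out : Int × Int) : Prop := out = Sum_number_alt num
instance (num : Int) (out : Int × Int) : Decidable (Spec_Sum_number num out) := by unfold Spec_Sum_number; infer_instance

-- ===== CLAIM (what is proved, stated in full; the proofs are below) =====
def Claim_equal_Sum_number : Prop := ∀ (num : Int), Dom_Sum_number num → Spec_Sum_number num (Sum_number num)

-- ===== LEMMAS AND PROOFS =====

-- enough fuel: every Int is below 10 ^ its bitLength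
theorem pv_lt_pow_bitLength (n : Int) : n < 10 ^ PySem.Int.bitLength n := by
  have h2 : n.natAbs < 2 ^ PySem.Int.bitLength n := PySem.Int.lt_two_pow_bitLength n
  have hle : (2:Int) ^ PySem.Int.bitLength n ≤ 10 ^ PySem.Int.bitLength n :=
    pow_le_pow_left₀ (by omega) (by omega) _
  have : n ≤ (n.natAbs : Int) := Int.le_natAbs
  have h2' : (n.natAbs : Int) < 2 ^ PySem.Int.bitLength n := by exact_mod_cast h2
  omega

theorem pv_fd_lt_pow (num : Int) (f : Nat) (h : num < 10 ^ (f+1)) :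
    PySem.Int.floordiv num 10 < 10 ^ f := by
  refine (PySem.Int.floordiv_lt_iff_lt_mul (by omega)).2 ?_
  calc num < 10 ^ (f+1) := h
    _ = 10 ^ f * 10 := pow_succ 10 f

theorem pv_pair_eq {a b c d : Int} (h1 : a = c) (h2 : b = d) : (a, b) = (c, d) := by
  rw [h1, h2]

theorem pvDsum_nonpos (f : Nat) (n s : Int) (h : ¬ n > 0) : pvDsum f n s = s := by
  cases f <;> simp [pvDsum, h]

theorem pvDsum_shift (f : Nat) : ∀ n s : Int, pvDsum f n s = s + pvDsum f n 0 := by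
  induction f with
  | zero => intro n s; simp [pvDsum]
  | succ f ih =>
    intro n s
    by_cases h : n > 0
    · simp only [pvDsum, if_pos h]
      rw [ih _ (s + PySem.Int.mod n 10), ih _ (0 + PySem.Int.mod n 10)]
      ring
    · simp only [pvDsum, if_neg h]; ring

theorem pvDsum_fuel (f : Nat) : ∀ (g : Nat) (n s : Int), n < 10 ^ f → n < 10 ^ g →
    pvDsum f n s = pvDsum g n s := by
  induction f with
  | zero =>
    intro g n s hf _
    have h : ¬ n > 0 := by simp at hf; omega
    rw [pvDsum_nonpos _ _ _ h, pvDsum_nonpos _ _ _ h]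
  | succ f ih =>
    intro g n s hf hg
    by_cases h : n > 0
    · cases g with
      | zero => simp at hg; omega
      | succ g =>
        simp only [pvDsum, if_pos h]
        exact ih g _ _ (pv_fd_lt_pow n f hf) (pv_fd_lt_pow n g hg)
    · rw [pvDsum_nonpos _ _ _ h, pvDsum_nonpos _ _ _ h]

theorem pvPeel_le (f : Nat) : ∀ m : Int, pvPeel f m ≤ m := by
  induction f with
  | zero => intro m; simp [pvPeel]
  | succ f ih =>
    intro m
    by_cases h : m > 1000
    · have hfd : PySem.Int.floordiv m 10 ≤ m := by
        have := (PySem.Int.floordiv_lt_iff_lt_mul (b := 10) (a := m) (q := m) (by omega)).2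
          (by nlinarith)
        omega
      simp only [pvPeel, if_pos h]
      exact le_trans (ih _) hfd
    · simp [pvPeel, h]

theorem pvPeel_id (f : Nat) (m : Int) (h : ¬ m > 1000) : pvPeel f m = m := by
  cases f <;> simp [pvPeel, h]

-- when 0 < num ≤ 1000, A's loop only ever feeds sum2
theorem loop_small (f : Nat) : ∀ num s s2 : Int, num < 10 ^ f → ¬ num > 1000 →
    Sum_number_loop f num s s2 = (s, s2 + pvDsum f num 0) := by
  induction f with
  | zero =>
    intro num s s2 hf _
    simp [Sum_number_loop, pvDsum]
  | succ f ih =>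
    intro num s s2 hf hle
    by_cases h : num > 0
    · have hfd := pv_fd_lt_pow num f hf
      have hfd1000 : ¬ PySem.Int.floordiv num 10 > 1000 := by
        have h0 : (0:Int) ≤ PySem.Int.floordiv num 10 :=
          (PySem.Int.le_floordiv_iff_mul_le (by omega)).2 (by omega)
        have := (PySem.Int.floordiv_lt_iff_lt_mul (b := 10) (a := num) (q := num) (by omega)).2
          (by nlinarith)
        omega
      simp only [Sum_number_loop, if_pos h, if_neg hle]
      rw [ih _ _ _ hfd hfd1000]
      have hds : pvDsum (f+1) num 0 =
          PySem.Int.mod num 10 + pvDsum f (PySem.Int.floordiv num 10) 0 := by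
        simp only [pvDsum, if_pos h]
        conv_lhs => rw [pvDsum_shift]
        ring
      rw [hds]
      exact pv_pair_eq (by ring) (by ring)
    · simp only [Sum_number_loop, if_neg h]
      rw [pvDsum_nonpos _ _ _ h]
      simp
  
theorem loop_main (f : Nat) : ∀ num s s2 : Int, num < 10 ^ f →
    Sum_number_loop f num s s2 =
      (s + (pvDsum f num 0 - pvDsum f (pvPeel f num) 0), s2 + pvDsum f (pvPeel f num) 0) := by
  induction f with
  | zero =>
    intro num s s2 hf
    have h : ¬ num > 0 := by simp at hf; omega
    simp only [Sum_number_loop, pvDsum]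
    exact pv_pair_eq (by ring) (by ring)
  | succ f ih =>
    intro num s s2 hf
    by_cases hbig : num > 1000
    · have h : num > 0 := by omega
      have hfd := pv_fd_lt_pow num f hf
      have hpe : pvPeel f (PySem.Int.floordiv num 10) < 10 ^ f :=
        lt_of_le_of_lt (pvPeel_le f _) hfd
      have hpow : (10:Int) ^ f < 10 ^ (f+1) := by
        rw [pow_succ]
        nlinarith [pow_pos (show (0:Int) < 10 by norm_num) f]
      simp only [Sum_number_loop, if_pos h, if_pos hbig]
      rw [ih _ _ _ hfd]
      have hpeel : pvPeel (f+1) num = pvPeel f (PySem.Int.floordiv num 10) := by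
        simp [pvPeel, hbig]
      have hds : pvDsum (f+1) num 0 =
          PySem.Int.mod num 10 + pvDsum f (PySem.Int.floordiv num 10) 0 := by
        simp only [pvDsum, if_pos h]
        conv_lhs => rw [pvDsum_shift]
        ring
      have hfu : pvDsum (f+1) (pvPeel f (PySem.Int.floordiv num 10)) 0 =
          pvDsum f (pvPeel f (PySem.Int.floordiv num 10)) 0 :=
        pvDsum_fuel (f+1) f _ 0 (lt_trans hpe hpow) hpe
      rw [hpeel, hds, hfu]
      exact pv_pair_eq (by ring) (by ring)
    · rw [loop_small (f+1) num s s2 hf hbig, pvPeel_id (f+1) num hbig]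
      exact pv_pair_eq (by ring) (by ring)
  
-- ===== VERDICT (by name: the statement is the Claim_ definition above) =====
theorem Sum_number_spec : Claim_equal_Sum_number := by
  intro num _
  show Sum_number num = Sum_number_alt num
  rw [Sum_number, Sum_number_alt]
  rw [loop_main (PySem.Int.bitLength num) num 0 0 (pv_lt_pow_bitLength num)]
  have hm : pvDsum (PySem.Int.bitLength num) (pvPeel (PySem.Int.bitLength num) num) 0 =
      pvDsum (PySem.Int.bitLength (pvPeel (PySem.Int.bitLength num) num))
        (pvPeel (PySem.Int.bitLength num) num) 0 :=
    pvDsum_fuel _ _ _ _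
      (lt_of_le_of_lt (pvPeel_le _ _) (pv_lt_pow_bitLength num))
      (pv_lt_pow_bitLength _)
  rw [hm]
  exact pv_pair_eq (by ring) (by ring)
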